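-- pv_equiv track=rewrite | github.com/Saksham-DWS/Task-Management-system | backend/app/services/ai.py | _ensure_min_words
-- ===== SOURCE A (Python) =====
-- from typing import List, Dict, Any
--
-- def _word_count(text: str) -> int:
--     if not text:
--         return 0
--     return len([t for t in text.split() if t])
--
-- def _ensure_min_words(text: str, min_words: int, extra_sections: List[str]) -> str:
--     if _word_count(text) >= min_words:
--         return text
--     sections = []
--     if text:
--         sections.append(text)
--     if not extra_sections:
--         return "\n\n".join(sections)
--     index = 0
--     max_iters = 50
--     while _word_count(" ".join(sections)) < min_words and index < max_iters:
--         section = extra_sections[index % len(extra_sections)]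
--         if section:
--             sections.append(section)
--         index += 1
--     return "\n\n".join([s for s in sections if s])
-- ===== SOURCE B (Python) =====
-- def _ensure_min_words(text, min_words, extra_sections):
--     # Staged alternative: precompute per-section word counts and a cyclic prefix-sum
--     # table, pick the cutoff k by a single scan, then slice-and-join once.
--     if not extra_sections:
--         return text
--     n = len(extra_sections)
--     counts = [len(s.split()) for s in extra_sections]
--     prefix = [len(text.split())]
--     for i in range(50):
--         prefix.append(prefix[-1] + counts[i % n])
--     k = next((i for i in range(51) if prefix[i] >= min_words), 50)
--     pieces = ([text] if text else []) + [s for s in (extra_sections[i % n] for i in range(k)) if s]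
--     return "\n\n".join(pieces)
-- ===== Notes on version B (the rewrite author's own statement) =====
-- stated objective: alternative
-- what changed: B replaces A's incremental append-and-recount while loop (which re-joins and re-splits the whole accumulated text each iteration) by a staged computation: per-section word counts computed once, a 50-entry cyclic prefix-sum table, a single scan picking the cutoff k, then one slice-filter-join; it trades A's early-exit loop for unconditional precomputation of the table.
import Mathlib
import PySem

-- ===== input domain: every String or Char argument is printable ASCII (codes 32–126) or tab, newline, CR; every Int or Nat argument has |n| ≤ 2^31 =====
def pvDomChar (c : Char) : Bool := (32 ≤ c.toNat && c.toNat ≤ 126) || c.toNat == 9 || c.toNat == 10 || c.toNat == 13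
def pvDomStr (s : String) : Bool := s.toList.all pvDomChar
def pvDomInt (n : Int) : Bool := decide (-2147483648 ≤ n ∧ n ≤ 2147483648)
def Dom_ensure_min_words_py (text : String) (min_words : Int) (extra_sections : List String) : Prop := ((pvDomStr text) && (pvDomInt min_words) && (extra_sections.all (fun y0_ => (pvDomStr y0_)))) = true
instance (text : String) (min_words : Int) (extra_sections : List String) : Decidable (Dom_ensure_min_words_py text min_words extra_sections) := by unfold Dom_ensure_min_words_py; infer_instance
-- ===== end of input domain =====

-- B replaces A's incremental re-join/re-count loop by a staged computation:
-- per-section word counts once, a 50-step cyclic prefix-sum table, one scan for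
-- the cutoff k, then a single slice-filter-join (objective: alternative algorithm, same cost).

-- ===== PORT A =====
-- _word_count: 'if not text: return 0; return len([t for t in text.split() if t])'
def pvWcA (text : String) : Int :=
  if text = "" then 0
  else (((PySem.Str.split₀ text).filter (fun t => t != "")).length : Int)

-- the while loop; fuel = 50 - index (max_iters = 50). extra_sections is non-empty in this
-- branch, and index ≥ 0, so Python's extra_sections[index % len] is the in-range element
-- at (index % length): List.getD is exact here.
def pvLoopA (extra : List String) (min_words : Int) : Nat → Nat → List String → List String
  | 0, _, sections => sections
  | fuel+1, index, sections =>
    if pvWcA (PySem.Str.join " " sections) < min_words then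
      let sec := extra.getD (index % extra.length) ""
      pvLoopA extra min_words fuel (index+1) (if sec != "" then sections ++ [sec] else sections)
    else sections

def ensure_min_words_py (text : String) (min_words : Int) (extra_sections : List String) : String :=
  if min_words ≤ pvWcA text then text
  else
    let sections := if text != "" then [text] else []
    if extra_sections.isEmpty then PySem.Str.join "\n\n" sections
    else PySem.Str.join "\n\n" ((pvLoopA extra_sections min_words 50 0 sections).filter (fun s => s != ""))

-- ===== PORT B =====
-- len(s.split())
def pvWcB (text : String) : Int := ((PySem.Str.split₀ text).length : Int)

def ensure_min_words_py_alt (text : String) (min_words : Int) (extra_sections : List String) : String :=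
  if extra_sections.isEmpty then text
  else
    let n := extra_sections.length
    let counts := extra_sections.map pvWcB
    -- 'prefix = [len(text.split())]; for i in range(50): prefix.append(prefix[-1] + counts[i % n])'
    -- prefix[-1] on a non-empty list and counts[i % n] with i % n < n are exact as getLast?/getD
    let pre := (List.range 50).foldl
      (fun p i => p ++ [p.getLast?.getD 0 + counts.getD (i % n) 0]) [pvWcB text]
    -- 'k = next((i for i in range(51) if prefix[i] >= min_words), 50)'
    let k := (((List.range 51).find? (fun i => decide (min_words ≤ pre.getD i 0))).getD 50)
    let pieces := (if text != "" then [text] else []) ++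
      (((List.range k).map (fun i => extra_sections.getD (i % n) "")).filter (fun s => s != ""))
    PySem.Str.join "\n\n" pieces

-- ===== PRECONDITION & SPEC =====
def Spec_ensure_min_words_py (text : String) (min_words : Int) (extra_sections : List String) (out : String) : Prop := out = ensure_min_words_py_alt text min_words extra_sections
instance (text : String) (min_words : Int) (extra_sections : List String) (out : String) : Decidable (Spec_ensure_min_words_py text min_words extra_sections out) := by unfold Spec_ensure_min_words_py; infer_instance

-- ===== CLAIM (what is proved, stated in full; the proofs are below) =====
def Claim_equal_ensure_min_words_py : Prop := ∀ (text : String) (min_words : Int) (extra_sections : List String), Dom_ensure_min_words_py text min_words extra_sections → Spec_ensure_min_words_py text min_words extra_sections (ensure_min_words_py text min_words extra_sections)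

-- ===== LEMMAS AND PROOFS =====

-- prefix sums of the cyclic word counts, seeded with the text's count
def pvPrefAt (extra : List String) (base : Int) : Nat → Int
  | 0 => base
  | j+1 => pvPrefAt extra base j + pvWcB (extra.getD (j % extra.length) "")

-- what A's loop appends, indexed by the prefix sums
def pvChunk (extra : List String) (mw base : Int) : Nat → Nat → List String
  | 0, _ => []
  | fuel+1, i =>
    if pvPrefAt extra base i < mw then
      (if extra.getD (i % extra.length) "" != "" then [extra.getD (i % extra.length) ""] else [])
        ++ pvChunk extra mw base fuel (i+1)
    else []

-- split₀ never produces an empty token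
theorem split₀go_ne_nil (s : List Char) : ∀ (cur : List Char) (acc : List (List Char)),
    (∀ w ∈ acc, w ≠ []) →
    ∀ w ∈ PySem.Chars.split₀.go s cur acc, w ≠ [] := by
  induction s with
  | nil =>
    intro cur acc hacc w hw
    simp only [PySem.Chars.split₀.go] at hw
    split at hw
    · exact hacc w (by simpa using hw)
    · rename_i hcur
      simp only [List.mem_reverse, List.mem_cons] at hw
      rcases hw with h | h
      · subst h; simpa [List.isEmpty_iff] using hcur
      · exact hacc w h
  | cons c rest ih =>
    intro cur acc hacc w hw
    simp only [PySem.Chars.split₀.go] at hw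
    split at hw
    · split at hw
      · exact ih [] acc hacc w hw
      · rename_i hcur
        refine ih [] (cur.reverse :: acc) ?_ w hw
        intro v hv
        rcases List.mem_cons.mp hv with h | h
        · subst h; simpa [List.isEmpty_iff] using hcur
        · exact hacc v h
    · exact ih (c :: cur) acc hacc w hw

theorem str_split₀_ne_empty (s : String) : ∀ t ∈ PySem.Str.split₀ s, t ≠ "" := by
  intro t ht
  simp only [PySem.Str.split₀, List.mem_map] at ht
  obtain ⟨w, hw, rfl⟩ := ht
  have hne : w ≠ [] := split₀go_ne_nil s.toList [] [] (by simp) w hw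
  intro he
  apply hne
  have := congrArg String.toList he
  simpa using this

theorem wcA_eq_wcB (s : String) : pvWcA s = pvWcB s := by
  by_cases h : s = ""
  · subst h
    simp [pvWcA, pvWcB, PySem.Str.split₀, PySem.Chars.split₀, PySem.Chars.split₀.go]
  · rw [pvWcA, if_neg h, pvWcB, List.filter_eq_self.mpr]
    intro t ht
    simpa using str_split₀_ne_empty s t ht

theorem pvWcB_empty : pvWcB "" = 0 := by
  simp [pvWcB, PySem.Str.split₀, PySem.Chars.split₀, PySem.Chars.split₀.go]

-- accumulator lemma for split₀.go
theorem split₀go_acc (s : List Char) : ∀ (cur : List Char) (acc : List (List Char)),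
    PySem.Chars.split₀.go s cur acc = acc.reverse ++ PySem.Chars.split₀.go s cur [] := by
  induction s with
  | nil =>
    intro cur acc
    simp only [PySem.Chars.split₀.go]
    split <;> simp
  | cons c rest ih =>
    intro cur acc
    simp only [PySem.Chars.split₀.go]
    split
    · split
      · rw [ih [] acc]
      · rw [ih [] (cur.reverse :: acc), ih [] [cur.reverse]]
        simp
    · rw [ih (c :: cur) acc]

theorem split₀go_append_space (b : List Char) (a : List Char) : ∀ (cur : List Char),
    PySem.Chars.split₀.go (a ++ ' ' :: b) cur []
      = PySem.Chars.split₀.go a cur [] ++ PySem.Chars.split₀.go b [] [] := by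
  induction a with
  | nil =>
    intro cur
    simp only [List.nil_append]
    conv_lhs => simp only [PySem.Chars.split₀.go]
    have hsp : PySem.Chars.isspace ' ' = true := by decide
    rw [if_pos hsp]
    by_cases hcur : cur.isEmpty
    · rw [if_pos hcur]
      simp only [PySem.Chars.split₀.go]
      rw [if_pos hcur]
      simp
    · rw [if_neg hcur, split₀go_acc]
      simp [PySem.Chars.split₀.go, hcur]
  | cons c rest ih =>
    intro cur
    simp only [List.cons_append, PySem.Chars.split₀.go]
    by_cases hsp : PySem.Chars.isspace c
    · rw [if_pos hsp, if_pos hsp]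
      by_cases hcur : cur.isEmpty
      · rw [if_pos hcur, if_pos hcur, ih]
      · rw [if_neg hcur, if_neg hcur, split₀go_acc rest [] [cur.reverse],
          split₀go_acc (rest ++ ' ' :: b) [] [cur.reverse], ih]
        simp
    · rw [if_neg hsp, if_neg hsp, ih]

-- word additivity across a single space
theorem split₀_append_space (a b : List Char) :
    PySem.Chars.split₀ (a ++ ' ' :: b) = PySem.Chars.split₀ a ++ PySem.Chars.split₀ b := by
  simpa [PySem.Chars.split₀] using split₀go_append_space b a []

theorem pvWcB_toList (s : String) : pvWcB s = ((PySem.Chars.split₀ s.toList).length : Int) := by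
  simp [pvWcB, PySem.Str.split₀]

theorem wcB_join (l : List String) :
    pvWcB (PySem.Str.join " " l) = (l.map pvWcB).sum := by
  induction l with
  | nil => simp [pvWcB, PySem.Str.join, PySem.Chars.join, PySem.Str.split₀, PySem.Chars.split₀]
  | cons x xs ih =>
    cases xs with
    | nil =>
      rw [pvWcB_toList, PySem.Str.toList_join]
      simp [PySem.Chars.join_singleton, pvWcB_toList]
    | cons y ys =>
      rw [pvWcB_toList, PySem.Str.toList_join] at ih ⊢
      simp only [List.map_cons]
      rw [PySem.Chars.join_cons_cons]
      have hsep : (" ".toList) = [' '] := by decide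
      rw [hsep]
      have : x.toList ++ [' '] ++ PySem.Chars.join [' '] (y.toList :: List.map String.toList ys)
          = x.toList ++ ' ' :: PySem.Chars.join [' '] (y.toList :: List.map String.toList ys) := by
        simp
      rw [this, split₀_append_space]
      rw [hsep] at ih
      simp only [List.length_append, List.sum_cons]
      simp only [List.map_cons] at ih
      rw [Nat.cast_add, pvWcB_toList x, ih]
      simp

-- A's loop, re-expressed through the prefix sums: it appends exactly pvChunk
theorem pvLoopA_chunk (extra : List String) (mw base : Int) :
    ∀ (fuel i : Nat) (pieces : List String), (∀ s ∈ pieces, s ≠ "") →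
    pvWcB (PySem.Str.join " " pieces) = pvPrefAt extra base i →
    pvLoopA extra mw fuel i pieces = pieces ++ pvChunk extra mw base fuel i
    ∧ ∀ s ∈ pvLoopA extra mw fuel i pieces, s ≠ "" := by
  intro fuel
  induction fuel with
  | zero => intro i pieces hne _; exact ⟨(List.append_nil pieces).symm, hne⟩
  | succ fuel ih =>
    intro i pieces hne hwc
    have hA : pvWcA (PySem.Str.join " " pieces) = pvPrefAt extra base i := by
      rw [wcA_eq_wcB]; exact hwc
    simp only [pvLoopA, pvChunk, hA]
    by_cases hc : pvPrefAt extra base i < mw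
    · rw [if_pos hc, if_pos hc]
      set s := extra.getD (i % extra.length) "" with hs
      by_cases hsne : s != ""
      · rw [if_pos hsne, if_pos hsne]
        have hne' : ∀ t ∈ pieces ++ [s], t ≠ "" := by
          intro t hmem
          rcases List.mem_append.mp hmem with h | h
          · exact hne t h
          · simp only [List.mem_singleton] at h; subst h; simpa using hsne
        have hwc' : pvWcB (PySem.Str.join " " (pieces ++ [s])) = pvPrefAt extra base (i+1) := by
          rw [wcB_join]
          simp only [List.map_append, List.sum_append, List.map_cons, List.map_nil,
            List.sum_cons, List.sum_nil]
          rw [← wcB_join, hwc]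
          simp only [pvPrefAt]
          rw [hs, List.getD_eq_getElem?_getD]
          ring
        have := ih (i+1) (pieces ++ [s]) hne' hwc'
        exact ⟨by rw [this.1, List.append_assoc], this.2⟩
      · rw [if_neg hsne, if_neg hsne]
        have hs0 : s = "" := by simpa using hsne
        have hwc' : pvWcB (PySem.Str.join " " pieces) = pvPrefAt extra base (i+1) := by
          rw [hwc]
          simp only [pvPrefAt]
          rw [← hs, hs0, pvWcB_empty, add_zero]
        have := ih (i+1) pieces hne hwc'
        exact ⟨by rw [this.1, List.nil_append], this.2⟩
    · rw [if_neg hc, if_neg hc]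
      exact ⟨(List.append_nil pieces).symm, hne⟩

-- the chunk is the filtered cyclic slice up to the cutoff K
theorem pvChunk_eq (extra : List String) (mw base : Int) (K : Nat)
    (hlt : ∀ j, j < K → pvPrefAt extra base j < mw)
    (hK : mw ≤ pvPrefAt extra base K ∨ K = 50) (hKle : K ≤ 50) :
    ∀ (fuel i : Nat), i + fuel = 50 → i ≤ K →
    pvChunk extra mw base fuel i
      = ((List.range' i (K - i)).map (fun j => extra.getD (j % extra.length) "")).filter
          (fun s => s != "") := by
  intro fuel
  induction fuel with
  | zero =>
    intro i h hi
    have : K = i := by omega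
    simp [pvChunk, this]
  | succ fuel ih =>
    intro i h hi
    by_cases hiK : i = K
    · have hKlt : K < 50 := by omega
      have hge : mw ≤ pvPrefAt extra base K := by
        rcases hK with h' | h'
        · exact h'
        · omega
      subst hiK
      simp [pvChunk, not_lt.mpr hge]
    · have hilt : i < K := lt_of_le_of_ne hi hiK
      have hp : pvPrefAt extra base i < mw := hlt i hilt
      have hKi : K - i = (K - (i+1)) + 1 := by omega
      rw [hKi, List.range'_succ]
      simp only [pvChunk, if_pos hp, List.map_cons, List.filter_cons]
      rw [ih (i+1) (by omega) (by omega)]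
      by_cases hx : extra[i % extra.length]?.getD "" = ""
      · simp [List.getD_eq_getElem?_getD, hx]
      · simp [List.getD_eq_getElem?_getD, hx]

-- the fold building 'prefix' produces the prefix-sum table
theorem pvPref_fold (extra : List String) (base : Int) (hn : extra ≠ []) : ∀ (m : Nat),
    (List.range m).foldl
      (fun p i => p ++ [p.getLast?.getD 0 + (extra.map pvWcB).getD (i % extra.length) 0]) [base]
      = (List.range (m+1)).map (pvPrefAt extra base) := by
  have hcnt : ∀ j, j < extra.length → (extra.map pvWcB).getD j 0 = pvWcB (extra.getD j "") := by
    intro j hj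
    rw [List.getD_eq_getElem?_getD, List.getD_eq_getElem?_getD, List.getElem?_map,
      List.getElem?_eq_getElem hj]
    simp
  intro m
  induction m with
  | zero => simp [pvPrefAt]
  | succ m ih =>
    rw [List.range_succ, List.foldl_append, ih]
    simp only [List.foldl_cons, List.foldl_nil]
    have hlast : ((List.range (m+1)).map (pvPrefAt extra base)).getLast?.getD 0
        = pvPrefAt extra base m := by
      rw [List.range_succ, List.map_append]
      simp
    rw [hlast, hcnt (m % extra.length) (Nat.mod_lt m (List.length_pos_iff.mpr hn))]
    rw [List.range_succ (n := m+1), List.map_append]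
    simp [pvPrefAt]

theorem pvPref_getD (extra : List String) (base : Int) (j : Nat) (hj : j < 51) :
    ((List.range 51).map (pvPrefAt extra base)).getD j 0 = pvPrefAt extra base j := by
  rw [List.getD_eq_getElem?_getD, List.getElem?_map, List.getElem?_range hj]
  simp

-- find? respects pointwise-equal predicates
theorem find?_congr' {α : Type} (l : List α) (p q : α → Bool)
    (h : ∀ a ∈ l, p a = q a) : l.find? p = l.find? q := by
  induction l with
  | nil => rfl
  | cons x xs ih =>
    simp only [List.find?_cons]
    rw [h x (List.mem_cons_self ..)]
    cases q x
    · exact ih (fun a ha => h a (List.mem_cons_of_mem _ ha))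
    · rfl

-- first hit of find? over range'
theorem find?_range'_first (p : Nat → Bool) : ∀ (len i m : Nat),
    (List.range' i len).find? p = some m →
    i ≤ m ∧ m < i + len ∧ p m = true ∧ ∀ j, i ≤ j → j < m → p j = false := by
  intro len
  induction len with
  | zero => intro i m h; simp at h
  | succ len ih =>
    intro i m h
    rw [List.range'_succ] at h
    by_cases hp : p i
    · rw [List.find?_cons_of_pos hp] at h
      obtain rfl : i = m := by simpa using h
      exact ⟨le_refl _, by omega, hp, fun j h1 h2 => absurd h2 (by omega)⟩
    · rw [List.find?_cons_of_neg (by simpa using hp)] at h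
      obtain ⟨h1, h2, h3, h4⟩ := ih (i+1) m h
      refine ⟨by omega, by omega, h3, ?_⟩
      intro j hj1 hj2
      rcases Nat.eq_or_lt_of_le hj1 with h' | h'
      · subst h'; simpa using hp
      · exact h4 j h' hj2

theorem str_join_singleton (sep t : String) : PySem.Str.join sep [t] = t := by
  have : (PySem.Str.join sep [t]).toList = t.toList := by
    rw [PySem.Str.toList_join]
    simp [PySem.Chars.join_singleton]
  exact String.toList_inj.mp this

theorem str_join_nil (sep : String) : PySem.Str.join sep [] = "" := by
  have : (PySem.Str.join sep []).toList = [] := by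
    rw [PySem.Str.toList_join]; simp [PySem.Chars.join, List.intercalate]
  exact String.toList_inj.mp this

-- ===== VERDICT (by name: the statement is the Claim_ definition above) =====
theorem ensure_min_words_py_spec : Claim_equal_ensure_min_words_py := by
  intro text min_words extra _hd
  unfold Spec_ensure_min_words_py ensure_min_words_py ensure_min_words_py_alt
  by_cases hE : extra.isEmpty
  · -- no extra sections: both sides are text
    simp only [if_pos hE]
    by_cases h1 : min_words ≤ pvWcA text
    · rw [if_pos h1]
    · rw [if_neg h1]
      by_cases ht : text = ""
      · simp [ht, str_join_nil]
      · simp [ht, str_join_singleton]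
  · simp only [if_neg hE]
    have hne : extra ≠ [] := by simpa using hE
    have hlen : 0 < extra.length := List.length_pos_iff.mpr hne
    set base := pvWcB text with hbase
    -- the fold equals the prefix-sum table
    rw [pvPref_fold extra base hne 50]
    -- rewrite the find? predicate through the table
    rw [find?_congr' (List.range 51) _ (fun i => decide (min_words ≤ pvPrefAt extra base i))
      (by intro a ha
          have : a < 51 := List.mem_range.mp ha
          rw [pvPref_getD extra base a this])]
    set K := (((List.range 51).find? (fun i => decide (min_words ≤ pvPrefAt extra base i))).getD 50)
      with hKdef
    -- properties of the cutoff K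
    have hKprops : K ≤ 50 ∧ (∀ j, j < K → pvPrefAt extra base j < min_words) ∧
        (min_words ≤ pvPrefAt extra base K ∨ K = 50) := by
      rcases hfind : (List.range 51).find? (fun i => decide (min_words ≤ pvPrefAt extra base i))
        with _ | m
      · have hK50 : K = 50 := by rw [hKdef, hfind]; rfl
        have hall := List.find?_eq_none.mp hfind
        refine ⟨by omega, ?_, Or.inr hK50⟩
        intro j hj
        have := hall j (List.mem_range.mpr (by omega))
        simpa using this
      · have hKm : K = m := by rw [hKdef, hfind]; rfl
        have hfind' : (List.range' 0 51).find?
            (fun i => decide (min_words ≤ pvPrefAt extra base i)) = some m := by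
          rw [← List.range_eq_range']; exact hfind
        obtain ⟨h1, h2, h3, h4⟩ := find?_range'_first _ 51 0 m hfind'
        refine ⟨by omega, ?_, Or.inl (by rw [hKm]; simpa using h3)⟩
        intro j hj
        have := h4 j (by omega) (by omega)
        simpa using this
    obtain ⟨hKle, hKlt, hKor⟩ := hKprops
    by_cases h1 : min_words ≤ pvWcA text
    · -- A returns text; B's cutoff is 0
      rw [if_pos h1]
      have hsome : (List.range 51).find? (fun i => decide (min_words ≤ pvPrefAt extra base i))
          = some 0 := by
        have h51 : List.range 51 = 0 :: List.range' 1 50 := by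
          rw [List.range_eq_range', List.range'_succ]
        rw [h51, List.find?_cons_of_pos]
        show decide (min_words ≤ pvPrefAt extra base 0) = true
        simp only [pvPrefAt]
        rw [hbase, ← wcA_eq_wcB]
        exact decide_eq_true h1
      have hK0 : K = 0 := by rw [hKdef, hsome]; rfl
      rw [hK0]
      simp only [List.range_zero, List.map_nil, List.filter_nil, List.append_nil]
      by_cases ht : text = ""
      · simp [ht, str_join_nil]
      · simp [ht, str_join_singleton]
    · rw [if_neg h1]
      -- loop → chunk → cyclic slice
      set pieces0 : List String := if text != "" then [text] else [] with hp0
      have hne0 : ∀ s ∈ pieces0, s ≠ "" := by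
        by_cases ht : text = "" <;> simp [hp0, ht]
      have hwc0 : pvWcB (PySem.Str.join " " pieces0) = pvPrefAt extra base 0 := by
        by_cases ht : text = ""
        · simp [hp0, ht, str_join_nil, pvPrefAt, hbase, pvWcB_empty]
        · simp [hp0, ht, str_join_singleton, pvPrefAt, hbase]
      obtain ⟨heq, hall⟩ := pvLoopA_chunk extra min_words base 50 0 pieces0 hne0 hwc0
      rw [List.filter_eq_self.mpr (by intro a ha; simpa using hall a ha), heq]
      rw [pvChunk_eq extra min_words base K hKlt hKor hKle 50 0 rfl (Nat.zero_le K)]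
      rw [← List.range_eq_range']
      simp
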